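-- pv_equiv track=rewrite | github.com/selfi123/HR-PRODIGY | password_complexity_checker/program.py | charactercheck
-- ===== SOURCE A (Python) =====
-- def charactercheck(passwd):
--     s,n,u=0,0,0
--     l=len(passwd)
--     for i in passwd:
--         if i.isalpha() and i.isupper():
--             u+=1
--         elif i.isdigit():
--             n+=1
--         elif not(i.isalnum()):
--             s+=1
--     return s,n,u
-- ===== SOURCE B (Python) =====
-- def charactercheck(passwd):
--     u = sum(1 for ch in passwd if ch.isalpha() and ch.isupper())
--     n = sum(1 for ch in passwd if ch.isdigit())
--     s = sum(1 for ch in passwd if not ch.isalnum())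
--     return s, n, u
-- ===== Notes on version B (the rewrite author's own statement) =====
-- stated objective: simpler
-- what changed: B replaces A's single stateful loop with an if/elif chain over a three-counter accumulator by three independent counting passes, one simple predicate each; this is correct because the three categories are pairwise disjoint (a digit is never alphabetic, a non-alphanumeric is neither a digit nor upper-case alpha).
import Mathlib
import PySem

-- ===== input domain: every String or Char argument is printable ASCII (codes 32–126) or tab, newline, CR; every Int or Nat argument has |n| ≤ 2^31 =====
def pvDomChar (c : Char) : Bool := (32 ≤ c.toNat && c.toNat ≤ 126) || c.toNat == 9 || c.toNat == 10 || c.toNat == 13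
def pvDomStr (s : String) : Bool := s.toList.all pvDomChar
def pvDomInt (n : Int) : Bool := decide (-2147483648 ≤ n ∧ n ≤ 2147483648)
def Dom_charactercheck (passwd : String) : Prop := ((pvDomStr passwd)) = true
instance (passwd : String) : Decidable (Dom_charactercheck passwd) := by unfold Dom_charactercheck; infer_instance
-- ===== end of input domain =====

-- B replaces A's single stateful loop (if/elif chain over a three-counter tuple) by three
-- independent counting passes, one plain predicate each; correct because the categories are disjoint.

-- ===== PORT A =====
-- A's loop body: the if/elif/elif chain over one character, updating (s, n, u)
def pvStepA (acc : Int × Int × Int) (i : Char) : Int × Int × Int :=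
  let (s, n, u) := acc
  if PySem.Chars.isalpha i && PySem.Chars.isupper i then (s, n, u + 1)
  else if PySem.Chars.isdigit i then (s, n + 1, u)
  else if !(PySem.Chars.isalnum i) then (s + 1, n, u)
  else (s, n, u)

def charactercheck (passwd : String) : Int × Int × Int :=
  -- s,n,u = 0,0,0 ; (l = len(passwd) is unused) ; for i in passwd: classify i
  passwd.toList.foldl pvStepA (0, 0, 0)

-- ===== PORT B =====
-- B: u = sum(... isalpha and isupper); n = sum(... isdigit); s = sum(... not isalnum); return (s, n, u)
def charactercheck_alt (passwd : String) : Int × Int × Int :=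
  let u : Int := (passwd.toList.countP (fun ch => PySem.Chars.isalpha ch && PySem.Chars.isupper ch) : Int)
  let n : Int := (passwd.toList.countP (fun ch => PySem.Chars.isdigit ch) : Int)
  let s : Int := (passwd.toList.countP (fun ch => !PySem.Chars.isalnum ch) : Int)
  (s, n, u)

-- ===== PRECONDITION & SPEC =====
def Spec_charactercheck (passwd : String) (out : Int × Int × Int) : Prop := out = charactercheck_alt passwd
instance (passwd : String) (out : Int × Int × Int) : Decidable (Spec_charactercheck passwd out) := by unfold Spec_charactercheck; infer_instance

-- ===== CLAIM (what is proved, stated in full; the proofs are below) =====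
def Claim_equal_charactercheck : Prop := ∀ (passwd : String), Dom_charactercheck passwd → Spec_charactercheck passwd (charactercheck passwd)

-- ===== LEMMAS AND PROOFS =====

-- the three branch predicates of A, in branch order
def pvU (c : Char) : Bool := PySem.Chars.isalpha c && PySem.Chars.isupper c
def pvN (c : Char) : Bool := !pvU c && PySem.Chars.isdigit c
def pvS (c : Char) : Bool := !pvU c && !PySem.Chars.isdigit c && !PySem.Chars.isalnum c

lemma pvStepA_eq (s n u : Int) (i : Char) :
    pvStepA (s, n, u) i
      = (s + (if pvS i then (1 : Int) else 0),
         n + (if pvN i then (1 : Int) else 0),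
         u + (if pvU i then (1 : Int) else 0)) := by
  by_cases hu : (PySem.Chars.isalpha i && PySem.Chars.isupper i) = true <;>
    by_cases hd : PySem.Chars.isdigit i = true <;>
    by_cases ha : PySem.Chars.isalnum i = true <;>
    simp [pvStepA, pvU, pvN, pvS, hu, hd, ha]

-- A's fold computes the three countP's of its branch predicates
lemma foldA_eq (xs : List Char) (s n u : Int) :
    xs.foldl pvStepA (s, n, u)
    = (s + (xs.countP pvS : Int), n + (xs.countP pvN : Int), u + (xs.countP pvU : Int)) := by
  induction xs generalizing s n u with
  | nil => simp
  | cons x t ih =>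
    rw [List.foldl_cons, pvStepA_eq, ih]
    simp only [List.countP_cons, Prod.mk.injEq]
    refine ⟨?_, ?_, ?_⟩ <;> (push_cast; split_ifs <;> ring)

-- a digit is never an (upper-case) letter, so A's second branch predicate is plain isdigit
lemma pvN_eq (c : Char) : pvN c = PySem.Chars.isdigit c := by
  have e0 : '0'.val.toNat = 48 := rfl
  have e9 : '9'.val.toNat = 57 := rfl
  have eA : 'A'.val.toNat = 65 := rfl
  have eZ : 'Z'.val.toNat = 90 := rfl
  have ea : 'a'.val.toNat = 97 := rfl
  have ez : 'z'.val.toNat = 122 := rfl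
  by_cases hd : PySem.Chars.isdigit c = true
  · have hu : (PySem.Chars.isalpha c && PySem.Chars.isupper c) = false := by
      simp only [PySem.Chars.isdigit, Bool.and_eq_true, decide_eq_true_eq, Char.le_def,
        UInt32.le_iff_toNat_le] at hd
      simp only [PySem.Chars.isalpha, PySem.Chars.isupper, PySem.Chars.islower, Bool.eq_false_iff,
        ne_eq, Bool.and_eq_true, Bool.or_eq_true, decide_eq_true_eq, Char.le_def,
        UInt32.le_iff_toNat_le, not_and, not_or]
      omega
    simp [pvN, pvU, hd, hu]
  · simp [pvN, Bool.eq_false_iff.mpr hd]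

-- a non-alphanumeric character is neither a digit nor a letter, so A's third branch
-- predicate is plain ¬isalnum
lemma pvS_eq (c : Char) : pvS c = !PySem.Chars.isalnum c := by
  by_cases ha : PySem.Chars.isalnum c = true
  · simp [pvS, ha]
  · have h := Bool.eq_false_iff.mpr ha
    have halnum : PySem.Chars.isalnum c = (PySem.Chars.isalpha c || PySem.Chars.isdigit c) := by
      simp [PySem.Chars.isalnum]
    rw [halnum] at h
    rcases Bool.or_eq_false_iff.mp h with ⟨hal, hdg⟩
    simp [pvS, pvU, hal, hdg, halnum]

-- ===== VERDICT (by name: the statement is the Claim_ definition above) =====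
theorem charactercheck_spec : Claim_equal_charactercheck := by
  intro passwd _
  unfold Spec_charactercheck charactercheck charactercheck_alt
  rw [foldA_eq]
  have hS : passwd.toList.countP pvS = passwd.toList.countP (fun ch => !PySem.Chars.isalnum ch) :=
    List.countP_congr (fun c _ => by rw [pvS_eq])
  have hN : passwd.toList.countP pvN = passwd.toList.countP (fun ch => PySem.Chars.isdigit ch) :=
    List.countP_congr (fun c _ => by rw [pvN_eq])
  have hU : passwd.toList.countP pvU
      = passwd.toList.countP (fun ch => PySem.Chars.isalpha ch && PySem.Chars.isupper ch) :=
    List.countP_congr (fun c _ => by rw [pvU])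
  simp [hS, hN, hU]
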